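-- pv_equiv track=rewrite | github.com/MegaBlackLabel/leetcode | 1869.longer-contiguous-segments-of-ones-than-zeros.py | checkZeroOnes
-- ===== SOURCE A (Python) =====
-- def checkZeroOnes(s: str) -> bool:
--     longestOnes = 0
--     longestZeros = 0
--     currentOnes = 0
--     currentZeros = 0
--
--     for c in s:
--         if c == '0':
--             currentOnes = 0
--             currentZeros += 1
--             longestZeros = max(longestZeros, currentZeros)
--         else:
--             currentZeros = 0
--             currentOnes += 1
--             longestOnes = max(longestOnes, currentOnes)
--
--     return longestOnes > longestZeros
-- ===== SOURCE B (Python) =====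
-- from itertools import groupby
--
--
-- def checkZeroOnes(s: str) -> bool:
--     groups = [(is_zero, sum(1 for _ in g))
--               for is_zero, g in groupby(s, key=lambda c: c == '0')]
--     ones = max((n for is_zero, n in groups if not is_zero), default=0)
--     zeros = max((n for is_zero, n in groups if is_zero), default=0)
--     return ones > zeros
-- ===== Notes on version B (the rewrite author's own statement) =====
-- stated objective: idiomatic
-- what changed: Replaces per-character run counters and running maxima with itertools.groupby: build the list of (is_zero, run-length) groups once, then compare the max group length among non-'0' runs with the max among '0' runs.
import Mathlib
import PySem

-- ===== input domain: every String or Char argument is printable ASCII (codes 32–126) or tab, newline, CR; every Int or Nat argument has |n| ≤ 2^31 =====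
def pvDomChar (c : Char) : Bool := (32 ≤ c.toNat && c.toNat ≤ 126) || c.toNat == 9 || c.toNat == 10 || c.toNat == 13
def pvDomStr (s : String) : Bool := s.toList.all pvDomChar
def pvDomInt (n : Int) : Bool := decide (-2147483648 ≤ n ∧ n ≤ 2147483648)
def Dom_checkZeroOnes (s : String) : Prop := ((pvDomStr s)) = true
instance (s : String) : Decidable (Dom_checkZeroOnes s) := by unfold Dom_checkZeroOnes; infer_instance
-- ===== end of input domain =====

-- B replaces A's per-character run counters with a groupby-style run list and compares max run lengths (idiomatic; same cost).

-- ===== PORT A =====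
-- the for-loop over s with state (longestOnes, longestZeros, currentOnes, currentZeros)
def loopA (lo lz co cz : Nat) : List Char → Nat × Nat
  | [] => (lo, lz)
  | c :: rest =>
    if c == '0' then loopA lo (max lz (cz + 1)) 0 (cz + 1) rest
    else loopA (max lo (co + 1)) lz (co + 1) 0 rest

def checkZeroOnes (s : String) : Bool :=
  let r := loopA 0 0 0 0 s.toList
  decide (r.1 > r.2)

-- ===== PORT B =====
-- groupby(s, key=c=='0'): builds the (is_zero, run-length) list as Python's groupby iterates
def runsAux (key : Bool) (cnt : Nat) : List Char → List (Bool × Nat)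
  | [] => [(key, cnt)]
  | c :: rest =>
    if (c == '0') = key then runsAux key (cnt + 1) rest
    else (key, cnt) :: runsAux (c == '0') 1 rest

def runs : List Char → List (Bool × Nat)
  | [] => []
  | c :: rest => runsAux (c == '0') 1 rest

-- max(..., default=0) over the groups with the given key
def mx (b : Bool) : List (Bool × Nat) → Nat
  | [] => 0
  | (b', n) :: rs => if b' = b then max n (mx b rs) else mx b rs

def checkZeroOnes_alt (s : String) : Bool :=
  let gs := runs s.toList
  decide (mx false gs > mx true gs)

-- ===== PRECONDITION & SPEC =====
def Spec_checkZeroOnes (s : String) (out : Bool) : Prop := out = checkZeroOnes_alt s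
instance (s : String) (out : Bool) : Decidable (Spec_checkZeroOnes s out) := by unfold Spec_checkZeroOnes; infer_instance

-- ===== CLAIM (what is proved, stated in full; the proofs are below) =====
def Claim_equal_checkZeroOnes : Prop := ∀ (s : String), Dom_checkZeroOnes s → Spec_checkZeroOnes s (checkZeroOnes s)

-- ===== LEMMAS AND PROOFS =====

lemma mx_true_cons_false (n : Nat) (rs : List (Bool × Nat)) :
    mx true ((false, n) :: rs) = mx true rs := by simp [mx]

lemma mx_false_cons_false (n : Nat) (rs : List (Bool × Nat)) :
    mx false ((false, n) :: rs) = max n (mx false rs) := by simp [mx]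

lemma mx_true_cons_true (n : Nat) (rs : List (Bool × Nat)) :
    mx true ((true, n) :: rs) = max n (mx true rs) := by simp [mx]

lemma mx_false_cons_true (n : Nat) (rs : List (Bool × Nat)) :
    mx false ((true, n) :: rs) = mx false rs := by simp [mx]

lemma mx_runsAux_self_ge (l : List Char) : ∀ b cnt, cnt ≤ mx b (runsAux b cnt l) := by
  induction l with
  | nil => intro b cnt; simp [runsAux, mx]
  | cons c rest ih =>
    intro b cnt
    simp only [runsAux]
    by_cases h : (c == '0') = b
    · simp only [h, if_pos rfl]
      exact le_trans (Nat.le_succ cnt) (ih b (cnt + 1))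
    · simp [h, mx]

lemma loopA_runsAux (l : List Char) : ∀ (cnt lo lz : Nat),
    (cnt ≤ lo → loopA lo lz cnt 0 l
        = (max lo (mx false (runsAux false cnt l)), max lz (mx true (runsAux false cnt l))))
  ∧ (cnt ≤ lz → loopA lo lz 0 cnt l
        = (max lo (mx false (runsAux true cnt l)), max lz (mx true (runsAux true cnt l)))) := by
  induction l with
  | nil =>
    intro cnt lo lz
    constructor <;> intro h <;> simp [loopA, runsAux, mx] <;> omega
  | cons c rest ih =>
    intro cnt lo lz
    by_cases hz : c == '0'
    · constructor
      · -- in a ones-run, hit a '0': the run closes, a zeros-run of length 1 starts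
        intro h
        have h1 := mx_runsAux_self_ge rest true 1
        have hi := (ih 1 lo (max lz 1)).2 (le_max_right _ _)
        rw [show loopA lo lz cnt 0 (c :: rest) = loopA lo (max lz 1) 0 1 rest from by
              simp [loopA, hz],
            show runsAux false cnt (c :: rest) = (false, cnt) :: runsAux true 1 rest from by
              simp [runsAux, hz],
            hi]
        simp only [mx_true_cons_false, mx_false_cons_false, Prod.mk.injEq]
        exact ⟨by omega, by omega⟩
      · -- in a zeros-run, another '0': the run grows
        intro h
        have h1 := mx_runsAux_self_ge rest true (cnt + 1)
        have hi := (ih (cnt + 1) lo (max lz (cnt + 1))).2 (le_max_right _ _)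
        rw [show loopA lo lz 0 cnt (c :: rest) = loopA lo (max lz (cnt + 1)) 0 (cnt + 1) rest from by
              simp [loopA, hz],
            show runsAux true cnt (c :: rest) = runsAux true (cnt + 1) rest from by
              simp [runsAux, hz],
            hi]
        simp only [Prod.mk.injEq]
        constructor <;> first | trivial | omega
    · constructor
      · -- in a ones-run, another non-'0': the run grows
        intro h
        have h1 := mx_runsAux_self_ge rest false (cnt + 1)
        have hi := (ih (cnt + 1) (max lo (cnt + 1)) lz).1 (le_max_right _ _)
        rw [show loopA lo lz cnt 0 (c :: rest) = loopA (max lo (cnt + 1)) lz (cnt + 1) 0 rest from by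
              simp [loopA, hz],
            show runsAux false cnt (c :: rest) = runsAux false (cnt + 1) rest from by
              simp [runsAux, hz],
            hi]
        simp only [Prod.mk.injEq]
        constructor <;> first | trivial | omega
      · -- in a zeros-run, hit a non-'0': the run closes, a ones-run of length 1 starts
        intro h
        have h1 := mx_runsAux_self_ge rest false 1
        have hi := (ih 1 (max lo 1) lz).1 (le_max_right _ _)
        rw [show loopA lo lz 0 cnt (c :: rest) = loopA (max lo 1) lz 1 0 rest from by
              simp [loopA, hz],
            show runsAux true cnt (c :: rest) = (true, cnt) :: runsAux false 1 rest from by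
              simp [runsAux, hz],
            hi]
        simp only [mx_true_cons_true, mx_false_cons_true, Prod.mk.injEq]
        exact ⟨by omega, by omega⟩

lemma loopA_eq_runs (l : List Char) :
    loopA 0 0 0 0 l = (mx false (runs l), mx true (runs l)) := by
  cases l with
  | nil => simp [loopA, runs, mx]
  | cons c rest =>
    by_cases hz : c == '0'
    · have h1 := mx_runsAux_self_ge rest true 1
      have hi := (loopA_runsAux rest 1 0 (max 0 1)).2 (le_max_right _ _)
      rw [show loopA 0 0 0 0 (c :: rest) = loopA 0 (max 0 1) 0 1 rest from by simp [loopA, hz],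
          show runs (c :: rest) = runsAux true 1 rest from by simp [runs, hz], hi]
      simp only [Prod.mk.injEq]
      constructor <;> first | trivial | omega
    · have h1 := mx_runsAux_self_ge rest false 1
      have hi := (loopA_runsAux rest 1 (max 0 1) 0).1 (le_max_right _ _)
      rw [show loopA 0 0 0 0 (c :: rest) = loopA (max 0 1) 0 1 0 rest from by simp [loopA, hz],
          show runs (c :: rest) = runsAux false 1 rest from by simp [runs, hz], hi]
      simp only [Prod.mk.injEq]
      constructor <;> first | trivial | omega

-- ===== VERDICT (by name: the statement is the Claim_ definition above) =====
theorem checkZeroOnes_spec : Claim_equal_checkZeroOnes := by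
  intro s _
  unfold Spec_checkZeroOnes checkZeroOnes checkZeroOnes_alt
  rw [loopA_eq_runs]
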